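-- pv_equiv track=rewrite | github.com/CodeGandee/accelsim-test | src/accelsim_test/gemm_transpose_bench/runner.py | _ensure_nvbench_defaults
-- ===== SOURCE A (Python) =====
-- def _parse_nvbench_flag_value(args: list[str], flag: str) -> str | None:
--     for i, a in enumerate(args):
--         if a == flag and i + 1 < len(args):
--             return args[i + 1]
--         if a.startswith(f"{flag}="):
--             return a.split("=", 1)[1]
--     return None
--
-- def _ensure_nvbench_defaults(args: list[str]) -> list[str]:
--     # Keep these defaults aligned with context/plans/plan-gemm-transpose-full-sweep-testing.md.
--     defaults: dict[str, str] = {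
--         "--stopping-criterion": "stdrel",
--         "--min-time": "0.5",
--         "--max-noise": "0.3",
--         "--min-samples": "20",
--     }
--     out = list(args)
--     for flag, val in defaults.items():
--         if _parse_nvbench_flag_value(out, flag) is None:
--             out += [flag, val]
--     return out
-- ===== SOURCE B (Python) =====
-- DEFAULTS = [
--     ("--stopping-criterion", "stdrel"),
--     ("--min-time", "0.5"),
--     ("--max-noise", "0.3"),
--     ("--min-samples", "20"),
-- ]
--
-- def _ensure_nvbench_defaults(args):
--     # One pass over args collecting the default flags already supplied, either as a
--     # "flag value" pair (the flag must not be the final token) or in "flag=value" form;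
--     # then append the missing defaults in order.
--     flags = {f for f, _ in DEFAULTS}
--     present = set()
--     n = len(args)
--     for i, a in enumerate(args):
--         if a in flags and i + 1 < n:
--             present.add(a)
--         for f, _ in DEFAULTS:
--             if a.startswith(f + "="):
--                 present.add(f)
--     tail = []
--     for f, v in DEFAULTS:
--         if f not in present:
--             tail += [f, v]
--     return args + tail
-- ===== Notes on version B (the rewrite author's own statement) =====
-- stated objective: alternative
-- what changed: A re-scans the growing output list once per default flag through an early-return parse helper; B makes a single enumerate pass over the original args building a set of already-present flags (bare non-final occurrence or flag= form), then appends the missing defaults in one membership loop.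
-- intended difference: On inputs whose final token is a bare default flag that is not otherwise supplied while an earlier default flag is also missing, A omits that flag's default pair (its re-scan of the growing output mistakes a previously appended default flag for the trailing flag's value), while B appends the default pair; B's value is the intended ensure-defaults behaviour. — e.g. on _ensure_nvbench_defaults(["--min-time"]): A returns ["--min-time", "--stopping-criterion", "stdrel", "--max-noise", "0.3", "--min-samples", "20"], B returns ["--min-time", "--stopping-criterion", "stdrel", "--min-time", "0.5", "--max-noise", "0.3", "--min-samples", "20"]
import Mathlib
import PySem

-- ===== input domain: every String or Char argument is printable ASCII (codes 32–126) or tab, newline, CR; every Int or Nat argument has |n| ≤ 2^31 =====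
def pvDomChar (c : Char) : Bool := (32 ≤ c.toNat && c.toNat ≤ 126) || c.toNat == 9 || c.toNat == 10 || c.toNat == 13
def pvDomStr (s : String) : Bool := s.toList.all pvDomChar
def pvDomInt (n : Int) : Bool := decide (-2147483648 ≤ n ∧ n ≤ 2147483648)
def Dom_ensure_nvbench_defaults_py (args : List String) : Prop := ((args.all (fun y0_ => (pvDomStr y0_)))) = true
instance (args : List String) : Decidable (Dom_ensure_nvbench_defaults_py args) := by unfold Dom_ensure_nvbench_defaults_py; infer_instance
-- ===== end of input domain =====

-- B replaces A's per-flag re-scans of the growing output list with one pass over the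
-- original args collecting the already-present flags, then appends the missing defaults.

-- ===== PORT A =====
-- _parse_nvbench_flag_value's scan: element a at index i, n = len(args); args[i+1] is rest.headD ""
-- (the guard i+1 < n makes rest nonempty); a.split("=",1)[1] via PySem.Str.splitMax? (sep "=" ≠ "" so
-- it is some, and the startswith guard guarantees index 1 exists).
def pvParseGo (flag : String) (n : Nat) (i : Nat) : List String → Option String
  | [] => none
  | a :: rest =>
    if a = flag ∧ i + 1 < n then some (rest.headD "")
    else if PySem.Str.startswith a (flag ++ "=") then
      some (((PySem.Str.splitMax? a "=" 1).getD []).getD 1 "")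
    else pvParseGo flag n (i + 1) rest

def pvParseNvbenchFlagValue (args : List String) (flag : String) : Option String :=
  pvParseGo flag args.length 0 args

def pvDefaultsA : PySem.Dict String String :=
  ⟨[("--stopping-criterion", "stdrel"), ("--min-time", "0.5"),
    ("--max-noise", "0.3"), ("--min-samples", "20")]⟩

def ensure_nvbench_defaults_py (args : List String) : List String :=
  (PySem.Dict.items pvDefaultsA).foldl
    (fun out fv =>
      if pvParseNvbenchFlagValue out fv.1 = none then out ++ [fv.1, fv.2] else out)
    args

-- ===== PORT B =====
def pvDefaultsB : List (String × String) :=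
  [("--stopping-criterion", "stdrel"), ("--min-time", "0.5"),
   ("--max-noise", "0.3"), ("--min-samples", "20")]

def ensure_nvbench_defaults_py_alt (args : List String) : List String :=
  let flags : PySem.Set String := PySem.Set.ofList (pvDefaultsB.map Prod.fst)
  let n := args.length
  let present : PySem.Set String :=
    (PySem.List.enumerate args).foldl
      (fun s ia =>
        let s := if flags.contains ia.2 && decide (ia.1 + 1 < (n : Int)) then s.add ia.2 else s
        pvDefaultsB.foldl
          (fun s fv => if PySem.Str.startswith ia.2 (fv.1 ++ "=") then s.add fv.1 else s) s)
      PySem.Set.empty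
  let tail : List String :=
    pvDefaultsB.foldl
      (fun tail fv => if !present.contains fv.1 then tail ++ [fv.1, fv.2] else tail)
      []
  args ++ tail

-- ===== PRECONDITION & SPEC =====
-- On inputs whose final token is a bare default flag that is not otherwise supplied (no non-final
-- bare occurrence, no "flag=" token), while an earlier default flag is also missing, A returns a
-- list WITHOUT that trailing flag's default pair (its re-scan of the growing output mistakes a
-- previously appended default flag for that trailing flag's value), whereas B appends the pair;
-- B's value is the intended "ensure defaults" behaviour.
def D_ensure_nvbench_defaults_py (args : List String) : Prop :=
  let fs := ["--stopping-criterion", "--min-time", "--max-noise", "--min-samples"]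
  let miss := fun f => !(args.dropLast.contains f || args.any (PySem.Str.startswith · (f ++ "=")))
  ∃ i : Fin 4, args.getLast? = some fs[(i : Nat)]! ∧ miss fs[(i : Nat)]! ∧ (fs.take i).any miss
instance (args : List String) : Decidable (D_ensure_nvbench_defaults_py args) := by
  unfold D_ensure_nvbench_defaults_py; infer_instance

def Spec_ensure_nvbench_defaults_py (args : List String) (out : List String) : Prop := ¬ D_ensure_nvbench_defaults_py args → out = ensure_nvbench_defaults_py_alt args
instance (args : List String) (out : List String) : Decidable (Spec_ensure_nvbench_defaults_py args out) := by unfold Spec_ensure_nvbench_defaults_py; infer_instance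

def pvDiffWitness_ensure_nvbench_defaults_py : List String := ["--min-time"]
def pvDiffWitnessOut_ensure_nvbench_defaults_py : (List String) × (List String) :=
  (["--min-time", "--stopping-criterion", "stdrel", "--max-noise", "0.3", "--min-samples", "20"],
   ["--min-time", "--stopping-criterion", "stdrel", "--min-time", "0.5", "--max-noise", "0.3",
    "--min-samples", "20"])

-- ===== CLAIM (what is proved, stated in full; the proofs are below) =====
def Claim_unchanged_ensure_nvbench_defaults_py : Prop := ∀ (args : List String), Dom_ensure_nvbench_defaults_py args → Spec_ensure_nvbench_defaults_py args (ensure_nvbench_defaults_py args)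
def Claim_exact_ensure_nvbench_defaults_py : Prop := ∀ (args : List String), Dom_ensure_nvbench_defaults_py args → D_ensure_nvbench_defaults_py args → ensure_nvbench_defaults_py args ≠ ensure_nvbench_defaults_py_alt args
def Claim_changed_ensure_nvbench_defaults_py : Prop := Dom_ensure_nvbench_defaults_py (pvDiffWitness_ensure_nvbench_defaults_py) ∧ D_ensure_nvbench_defaults_py (pvDiffWitness_ensure_nvbench_defaults_py) ∧ ensure_nvbench_defaults_py (pvDiffWitness_ensure_nvbench_defaults_py) = pvDiffWitnessOut_ensure_nvbench_defaults_py.1 ∧ ensure_nvbench_defaults_py_alt (pvDiffWitness_ensure_nvbench_defaults_py) = pvDiffWitnessOut_ensure_nvbench_defaults_py.2 ∧ pvDiffWitnessOut_ensure_nvbench_defaults_py.1 ≠ pvDiffWitnessOut_ensure_nvbench_defaults_py.2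

-- ===== LEMMAS AND PROOFS =====

-- proof-side recursive form of pvHit, matching A's scan structure
def pvHitRec (f : String) : List String → Bool
  | [] => false
  | a :: rest =>
    ((a == f) && !rest.isEmpty) || PySem.Str.startswith a (f ++ "=") || pvHitRec f rest

lemma pvHitRec_eq (f : String) : ∀ xs : List String,
    pvHitRec f xs = (xs.dropLast.contains f || xs.any (PySem.Str.startswith · (f ++ "="))) := by
  intro xs
  induction xs with
  | nil => simp [pvHitRec]
  | cons a rest ih =>
    cases rest with
    | nil =>
      simp [pvHitRec]
    | cons b rs =>
      simp only [pvHitRec, List.dropLast_cons₂, List.contains_cons, List.any_cons,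
        List.isEmpty_cons, Bool.not_false, Bool.and_true] at ih ⊢
      rw [ih]
      by_cases hfa : a = f
      · subst hfa; simp
      · have h1 : (a == f) = false := by simpa using hfa
        have h2 : (f == a) = false := by simpa using (Ne.symm hfa)
        rw [h1, h2]
        simp [Bool.or_left_comm]

lemma pvParseGo_eq_none (f : String) :
    ∀ (xs : List String) (i n : Nat), n = i + xs.length →
      ((pvParseGo f n i xs = none) ↔ pvHitRec f xs = false) := by
  intro xs
  induction xs with
  | nil => intro i n _; simp [pvParseGo, pvHitRec]
  | cons a rest ih =>
    intro i n h
    have hlt : (i + 1 < n) ↔ rest ≠ [] := by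
      subst h; cases rest <;> simp
    simp only [pvParseGo, pvHitRec]
    split_ifs with h1 h2
    · have hne : rest ≠ [] := hlt.mp h1.2
      rw [h1.1]
      simp [hne]
    · rw [h2]
      simp
    · have hsw : PySem.Str.startswith a (f ++ "=") = false := eq_false_of_ne_true h2
      rw [ih (i + 1) n (by simp only [List.length_cons] at h; omega), hsw]
      by_cases ha : a = f
      · have hre : rest = [] := by
          by_contra hne
          exact h1 ⟨ha, hlt.mpr hne⟩
        subst hre
        simp [pvHitRec]
      · simp [ha]

lemma pvContains_add (s : PySem.Set String) (x f : String) :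
    (s.add x).contains f = (s.contains f || f == x) := by
  simp only [PySem.Set.add]
  split
  · rename_i hx
    cases hfx : f == x
    · simp
    · have : f = x := by simpa using hfx
      subst this
      simp [PySem.Set.contains] at hx ⊢
      simp [hx]
  · simp only [PySem.Set.contains, List.contains_eq_mem, List.mem_append, List.mem_singleton]
    cases hfx : f == x
    · have : ¬ f = x := by simpa using hfx
      simp [this]
    · have : f = x := by simpa using hfx
      simp [this]

lemma pvAny_eq (f : String) (xs : List String) :
    xs.any (fun a => a == f || PySem.Str.startswith a (f ++ "=")) =
      (pvHitRec f xs || xs.getLast? == some f) := by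
  induction xs with
  | nil => simp [pvHitRec]
  | cons a rest ih =>
    cases rest with
    | nil =>
      simp only [List.any_cons, List.any_nil, pvHitRec, List.isEmpty_nil]
      cases hsw : PySem.Str.startswith a (f ++ "=") <;>
        cases hfa : a == f <;> simp_all
    | cons b rs =>
      simp only [List.any_cons, pvHitRec, List.isEmpty_cons, List.getLast?_cons_cons] at ih ⊢
      cases hsw : PySem.Str.startswith a (f ++ "=") <;>
        cases hfa : a == f <;> simp_all

lemma pvHitRec_eq_false_of (f : String) (xs : List String)
    (h : ∀ x ∈ xs, x ≠ f ∧ PySem.Str.startswith x (f ++ "=") = false) :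
    pvHitRec f xs = false := by
  induction xs with
  | nil => simp [pvHitRec]
  | cons a rest ih =>
    obtain ⟨hne, hsw⟩ := h a (by simp)
    simp only [pvHitRec, hsw]
    have : (a == f) = false := by simpa using hne
    simp [this, ih (fun x hx => h x (by simp [hx]))]

lemma pvHitRec_append (f : String) (xs ys : List String) (hys : ys ≠ []) :
    pvHitRec f (xs ++ ys) =
      (xs.any (fun a => a == f || PySem.Str.startswith a (f ++ "=")) || pvHitRec f ys) := by
  induction xs with
  | nil => simp
  | cons a rest ih =>
    simp only [List.cons_append, pvHitRec, List.any_cons, ih]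
    have : (rest ++ ys).isEmpty = false := by simp [hys]
    rw [this]
    cases a == f <;> cases PySem.Str.startswith a (f ++ "=") <;> simp

lemma pvInner (ds : List (String × String)) (a f : String) :
    ∀ s : PySem.Set String,
      (ds.foldl (fun s fv => if PySem.Str.startswith a (fv.1 ++ "=") then s.add fv.1 else s) s).contains f
        = (s.contains f || ds.any (fun fv => f == fv.1 && PySem.Str.startswith a (fv.1 ++ "="))) := by
  induction ds with
  | nil => intro s; simp
  | cons fv ds ih =>
    intro s
    simp only [List.foldl_cons, List.any_cons, ih]
    cases hsw : PySem.Str.startswith a (fv.1 ++ "=")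
    · simp
    · rw [if_pos rfl, pvContains_add]
      cases f == fv.1 <;> simp

lemma pvFlagCases (f : String)
    (hf : (PySem.Set.ofList (pvDefaultsB.map Prod.fst)).contains f = true) :
    f = "--stopping-criterion" ∨ f = "--min-time" ∨ f = "--max-noise" ∨ f = "--min-samples" := by
  simp only [PySem.Set.contains, List.contains_eq_mem, decide_eq_true_eq] at hf
  have : f ∈ pvDefaultsB.map Prod.fst := (PySem.Set.mem_ofList _ _).mp hf
  simpa [pvDefaultsB] using this

lemma pvAnyDefaults (a f : String)
    (hf : (PySem.Set.ofList (pvDefaultsB.map Prod.fst)).contains f = true) :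
    pvDefaultsB.any (fun fv => f == fv.1 && PySem.Str.startswith a (fv.1 ++ "=")) =
      PySem.Str.startswith a (f ++ "=") := by
  rcases pvFlagCases f hf with rfl | rfl | rfl | rfl <;>
    simp [pvDefaultsB, beq_eq_decide]

-- membership in B's `present` set (for f one of the default flags) is exactly pvHitRec
lemma pvPresentGo (N : Nat) (f : String)
    (hf : (PySem.Set.ofList (pvDefaultsB.map Prod.fst)).contains f = true) :
    ∀ (xs : List String) (i : Int) (s : PySem.Set String), (N : Int) = i + xs.length →
      ((PySem.List.enumerate xs i).foldl
          (fun s ia =>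
            let s := if (PySem.Set.ofList (pvDefaultsB.map Prod.fst)).contains ia.2
                          && decide (ia.1 + 1 < (N : Int)) then s.add ia.2 else s
            pvDefaultsB.foldl
              (fun s fv => if PySem.Str.startswith ia.2 (fv.1 ++ "=") then s.add fv.1 else s) s)
          s).contains f
        = (s.contains f || pvHitRec f xs) := by
  intro xs
  induction xs with
  | nil => intro i s h; simp [pvHitRec]
  | cons a rest ih =>
    intro i s h
    have h' : (N : Int) = (i + 1) + rest.length := by
      simp only [List.length_cons] at h; push_cast at h ⊢; omega
    have hlt : ((i : Int) + 1 < (N : Int)) ↔ rest ≠ [] := by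
      rw [h']; cases rest with
      | nil => simp
      | cons c cs => simp only [List.length_cons, ne_eq, reduceCtorEq, not_false_eq_true,
          iff_true]; push_cast; omega
    rw [PySem.List.enumerate_cons, List.foldl_cons]
    simp only []
    rw [ih (i+1) _ h', pvInner, pvAnyDefaults a f hf]
    simp only [pvHitRec]
    by_cases hc : ((PySem.Set.ofList (pvDefaultsB.map Prod.fst)).contains a
        && decide ((i : Int) + 1 < (N : Int))) = true
    · rw [if_pos hc, pvContains_add]
      obtain ⟨hca, hi⟩ := Bool.and_eq_true_iff.mp hc
      have hne : rest ≠ [] := hlt.mp (of_decide_eq_true hi)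
      have hre : rest.isEmpty = false := by simp [hne]
      rw [hre]
      cases hfa : a == f
      · have hfa' : (f == a) = false := by
          cases hx : f == a
          · rfl
          · exfalso
            have : f = a := by simpa using hx
            subst this
            simp at hfa
        rw [hfa']
        cases s.contains f <;> cases PySem.Str.startswith a (f ++ "=") <;>
          cases pvHitRec f rest <;> simp
      · have haf : a = f := by simpa using hfa
        subst haf
        simp
    · rw [if_neg hc]
      have hterm : ((a == f) && !rest.isEmpty) = false := by
        cases hfa : a == f
        · simp
        · have haf : a = f := by simpa using hfa
          subst haf
          have hdec : decide ((i : Int) + 1 < (N : Int)) = false := by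
            cases hd : decide ((i : Int) + 1 < (N : Int))
            · rfl
            · exact absurd (by rw [hf, hd]; rfl) hc
          have hnl : ¬ ((i : Int) + 1 < (N : Int)) := by simpa using hdec
          have hre : rest = [] := by
            by_contra hne
            exact hnl (hlt.mpr hne)
          subst hre
          simp
      rw [hterm]
      cases s.contains f <;> cases PySem.Str.startswith a (f ++ "=") <;>
        cases pvHitRec f rest <;> simp

lemma pvPresentEq (args : List String) : ∀ fv ∈ pvDefaultsB,
    ((PySem.List.enumerate args).foldl
      (fun s ia =>
        let s := if (PySem.Set.ofList (pvDefaultsB.map Prod.fst)).contains ia.2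
                      && decide (ia.1 + 1 < (args.length : Int)) then s.add ia.2 else s
        pvDefaultsB.foldl
          (fun s fv => if PySem.Str.startswith ia.2 (fv.1 ++ "=") then s.add fv.1 else s) s)
      PySem.Set.empty).contains fv.1 = pvHitRec fv.1 args := by
  intro fv hfv
  have hf : (PySem.Set.ofList (pvDefaultsB.map Prod.fst)).contains fv.1 = true := by
    have : fv.1 ∈ pvDefaultsB.map Prod.fst := List.mem_map_of_mem hfv
    simp only [PySem.Set.contains, List.contains_eq_mem, decide_eq_true_eq]
    exact (PySem.Set.mem_ofList _ _).mpr this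
  rw [pvPresentGo args.length fv.1 hf args 0 PySem.Set.empty (by simp)]
  rfl

-- B's port, with the `present` set resolved: one append-loop guarded by pvHitRec
lemma pvFoldCondCong (p q : String × String → Bool) :
    ∀ (ds : List (String × String)) (t : List String), (∀ fv ∈ ds, p fv = q fv) →
      ds.foldl (fun tl fv => if !p fv then tl ++ [fv.1, fv.2] else tl) t
        = ds.foldl (fun tl fv => if !q fv then tl ++ [fv.1, fv.2] else tl) t := by
  intro ds
  induction ds with
  | nil => intro t _; rfl
  | cons fv ds ih =>
    intro t h
    rw [List.foldl_cons, List.foldl_cons, h fv (by simp)]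
    exact ih _ (fun g hg => h g (List.mem_cons_of_mem fv hg))

lemma pvBchar (args : List String) :
    ensure_nvbench_defaults_py_alt args
      = args ++ pvDefaultsB.foldl
          (fun tl fv => if !pvHitRec fv.1 args then tl ++ [fv.1, fv.2] else tl) [] := by
  unfold ensure_nvbench_defaults_py_alt
  dsimp only []
  congr 1
  exact pvFoldCondCong _ (fun fv => pvHitRec fv.1 args) pvDefaultsB []
    (fun fv hfv => pvPresentEq args fv hfv)

-- A's port, characterised: the same append-loop additionally guarded by the last-token check
lemma pvAchar (args : List String) :
    ∀ (ds : List (String × String)) (t : List String),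
      (∀ x ∈ t, ∀ fv ∈ ds, x ≠ fv.1 ∧ PySem.Str.startswith x (fv.1 ++ "=") = false) →
      ds.Pairwise (fun fv fv' => (fv.1 ≠ fv'.1 ∧ PySem.Str.startswith fv.1 (fv'.1 ++ "=") = false)
        ∧ (fv.2 ≠ fv'.1 ∧ PySem.Str.startswith fv.2 (fv'.1 ++ "=") = false)) →
      ds.foldl (fun out fv =>
          if pvParseNvbenchFlagValue out fv.1 = none then out ++ [fv.1, fv.2] else out)
        (args ++ t)
      = args ++ ds.foldl (fun tl fv =>
          if !pvHitRec fv.1 args && !(decide (tl ≠ []) && (args.getLast? == some fv.1))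
          then tl ++ [fv.1, fv.2] else tl) t := by
  intro ds
  induction ds with
  | nil => intro t _ _; simp
  | cons fv ds ih =>
    intro t hinv hpw
    rw [List.foldl_cons, List.foldl_cons]
    have hpn : (pvParseNvbenchFlagValue (args ++ t) fv.1 = none) ↔
        pvHitRec fv.1 (args ++ t) = false :=
      pvParseGo_eq_none fv.1 (args ++ t) 0 (args ++ t).length (by simp)
    have hcond : (pvParseNvbenchFlagValue (args ++ t) fv.1 = none) ↔
        ((!pvHitRec fv.1 args && !(decide (t ≠ []) && (args.getLast? == some fv.1))) = true) := by
      rw [hpn]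
      cases t with
      | nil => simp
      | cons x xs =>
        rw [pvHitRec_append fv.1 args (x :: xs) (List.cons_ne_nil x xs), pvAny_eq]
        rw [pvHitRec_eq_false_of fv.1 (x :: xs)
          (fun y hy => hinv y hy fv List.mem_cons_self)]
        cases pvHitRec fv.1 args <;> cases args.getLast? == some fv.1 <;> simp
    by_cases hc : pvParseNvbenchFlagValue (args ++ t) fv.1 = none
    · rw [if_pos hc, if_pos (hcond.mp hc), List.append_assoc]
      exact ih (t ++ [fv.1, fv.2])
        (by
          intro y hy g hg
          rcases List.mem_append.mp hy with hy' | hy'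
          · exact hinv y hy' g (List.mem_cons_of_mem fv hg)
          · have hrel := (List.pairwise_cons.mp hpw).1 g hg
            rcases List.mem_cons.mp hy' with rfl | hy''
            · exact hrel.1
            · rcases List.mem_cons.mp hy'' with rfl | hy3
              · exact hrel.2
              · cases hy3)
        (List.pairwise_cons.mp hpw).2
    · rw [if_neg hc, if_neg (fun h => hc (hcond.mpr h))]
      exact ih t
        (fun y hy g hg => hinv y hy g (List.mem_cons_of_mem fv hg))
        (List.pairwise_cons.mp hpw).2

-- A's append loop over the growing `out` equals B's append loop over `tail`, given that
-- `present` answers pvHitRec, appended tokens never match later flags, and no remaining flag is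
-- simultaneously missing, the final token of args, and preceded (in ds) by a missing flag
-- while tail is nonempty (the ¬D_ condition threaded through the fold).
lemma pvTailFold (args : List String) (present : PySem.Set String) :
    ∀ (ds : List (String × String)) (t : List String),
      (∀ fv ∈ ds, present.contains fv.1 = pvHitRec fv.1 args) →
      (∀ x ∈ t, ∀ fv ∈ ds, x ≠ fv.1 ∧ PySem.Str.startswith x (fv.1 ++ "=") = false) →
      ds.Pairwise (fun fv fv' => (fv.1 ≠ fv'.1 ∧ PySem.Str.startswith fv.1 (fv'.1 ++ "=") = false)
        ∧ (fv.2 ≠ fv'.1 ∧ PySem.Str.startswith fv.2 (fv'.1 ++ "=") = false)) →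
      (∀ ds1 fv ds2, ds = ds1 ++ fv :: ds2 → pvHitRec fv.1 args = false →
        args.getLast? = some fv.1 → t = [] ∧ ∀ g ∈ ds1, pvHitRec g.1 args = true) →
      ds.foldl (fun out fv =>
          if pvParseNvbenchFlagValue out fv.1 = none then out ++ [fv.1, fv.2] else out)
        (args ++ t)
      = args ++ ds.foldl (fun tl fv =>
          if !present.contains fv.1 then tl ++ [fv.1, fv.2] else tl) t := by
  intro ds
  induction ds with
  | nil => intro t _ _ _ _; simp
  | cons fv ds ih =>
    intro t hpres hinv hpw hH
    rw [List.foldl_cons, List.foldl_cons]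
    have hpn : (pvParseNvbenchFlagValue (args ++ t) fv.1 = none) ↔
        pvHitRec fv.1 (args ++ t) = false :=
      pvParseGo_eq_none fv.1 (args ++ t) 0 (args ++ t).length (by simp)
    have hBc : present.contains fv.1 = pvHitRec fv.1 args := hpres fv (by simp)
    by_cases hh : pvHitRec fv.1 args = true
    · -- already supplied: both skip
      have hAno : ¬ (pvParseNvbenchFlagValue (args ++ t) fv.1 = none) := by
        rw [hpn]
        cases t with
        | nil => simp [hh]
        | cons x xs =>
          rw [pvHitRec_append fv.1 args (x :: xs) (List.cons_ne_nil x xs), pvAny_eq]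
          simp [hh]
      have hBno : ¬ ((!present.contains fv.1) = true) := by
        rw [hBc, hh]; simp
      rw [if_neg hAno, if_neg hBno]
      exact ih t (fun g hg => hpres g (List.mem_cons_of_mem fv hg))
        (fun x hx g hg => hinv x hx g (List.mem_cons_of_mem fv hg))
        (List.pairwise_cons.mp hpw).2
        (fun ds1 g ds2 hsplit hm hl => by
          obtain ⟨h1, h2⟩ := hH (fv :: ds1) g ds2 (by rw [hsplit]; rfl) hm hl
          exact ⟨h1, fun g' hg' => h2 g' (List.mem_cons_of_mem fv hg')⟩)
    · have hh' : pvHitRec fv.1 args = false := eq_false_of_ne_true hh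
      have hByes : (!present.contains fv.1) = true := by rw [hBc, hh']; rfl
      cases ht : t with
      | nil =>
        -- tail empty: both append
        subst ht
        have hA : pvParseNvbenchFlagValue (args ++ []) fv.1 = none := by
          rw [hpn]; simpa using hh'
        rw [if_pos hA, if_pos hByes, List.append_nil]
        exact ih [fv.1, fv.2]
          (fun g hg => hpres g (List.mem_cons_of_mem fv hg))
          (by
            intro x hx g hg
            have hrel := (List.pairwise_cons.mp hpw).1 g hg
            rcases List.mem_cons.mp hx with rfl | hx'
            · exact hrel.1
            · rcases List.mem_cons.mp hx' with rfl | hx''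
              · exact hrel.2
              · cases hx'')
          (List.pairwise_cons.mp hpw).2
          (fun ds1 g ds2 hsplit hm hl => by
            obtain ⟨_, h2⟩ := hH (fv :: ds1) g ds2 (by rw [hsplit]; rfl) hm hl
            exact absurd (h2 fv List.mem_cons_self) (by simp [hh']))
      | cons x xs =>
        subst ht
        have htne : (x :: xs : List String) ≠ [] := List.cons_ne_nil x xs
        have htf : pvHitRec fv.1 (x :: xs) = false :=
          pvHitRec_eq_false_of fv.1 (x :: xs) (fun y hy => hinv y hy fv (by simp))
        have hAform : pvHitRec fv.1 (args ++ x :: xs) =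
            (pvHitRec fv.1 args || args.getLast? == some fv.1) := by
          rw [pvHitRec_append fv.1 args (x :: xs) htne, pvAny_eq, htf]
          cases pvHitRec fv.1 args <;> cases args.getLast? == some fv.1 <;> simp
        by_cases hl : args.getLast? = some fv.1
        · -- impossible: the ¬D_ hypothesis forces t = []
          obtain ⟨h1, -⟩ := hH [] fv ds rfl hh' hl
          exact absurd h1 htne
        · have hA : pvParseNvbenchFlagValue (args ++ x :: xs) fv.1 = none := by
            rw [hpn, hAform, hh']
            simp [hl]
          rw [if_pos hA, if_pos hByes, List.append_assoc]
          exact ih (x :: xs ++ [fv.1, fv.2])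
            (fun g hg => hpres g (List.mem_cons_of_mem fv hg))
            (by
              intro y hy g hg
              rcases List.mem_append.mp hy with hy' | hy'
              · exact hinv y hy' g (List.mem_cons_of_mem fv hg)
              · have hrel := (List.pairwise_cons.mp hpw).1 g hg
                rcases List.mem_cons.mp hy' with rfl | hy''
                · exact hrel.1
                · rcases List.mem_cons.mp hy'' with rfl | hy3
                  · exact hrel.2
                  · cases hy3)
            (List.pairwise_cons.mp hpw).2
            (fun ds1 g ds2 hsplit hm hl' => by
              obtain ⟨h1, -⟩ := hH (fv :: ds1) g ds2 (by rw [hsplit]; rfl) hm hl'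
              exact absurd h1 htne)

-- ===== VERDICT (by name: the statement is the Claim_ definition above) =====
theorem ensure_nvbench_defaults_py_spec : Claim_unchanged_ensure_nvbench_defaults_py := by
  intro args _
  unfold Spec_ensure_nvbench_defaults_py
  intro hnd
  show ensure_nvbench_defaults_py args = ensure_nvbench_defaults_py_alt args
  unfold ensure_nvbench_defaults_py ensure_nvbench_defaults_py_alt
  dsimp only []
  rw [show PySem.Dict.items pvDefaultsA = pvDefaultsB from rfl]
  have hpres := pvPresentEq args
  have hH : ∀ (ds1 : List (String × String)) fv ds2, pvDefaultsB = ds1 ++ fv :: ds2 →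
      pvHitRec fv.1 args = false → args.getLast? = some fv.1 →
      ([] : List String) = [] ∧ ∀ g ∈ ds1, pvHitRec g.1 args = true := by
    intro ds1 fv ds2 hsplit hm hl
    refine ⟨rfl, ?_⟩
    rcases ds1 with _ | ⟨p1, _ | ⟨p2, _ | ⟨p3, _ | ⟨p4, rest⟩⟩⟩⟩
    · intro g hg; cases hg
    · -- fv is the second default, "--min-time"
      obtain ⟨hp1, hfv, -⟩ : p1 = ("--stopping-criterion", "stdrel") ∧
          fv = ("--min-time", "0.5") ∧ ds2 = _ := by
        simpa [pvDefaultsB] using hsplit.symm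
      subst hp1; subst hfv
      intro g hg
      rcases List.mem_singleton.mp hg with rfl
      by_contra h1
      have h1' : pvHitRec "--stopping-criterion" args = false := by simpa using h1
      exact hnd ⟨1, hl, by change (!(args.dropLast.contains "--min-time" || args.any fun x => PySem.Str.startswith x ("--min-time" ++ "="))) = true; rw [← pvHitRec_eq]; simp [hm],
        List.any_eq_true.mpr ⟨"--stopping-criterion", by decide, by change (!(args.dropLast.contains "--stopping-criterion" || args.any fun x => PySem.Str.startswith x ("--stopping-criterion" ++ "="))) = true; rw [← pvHitRec_eq]; simp [h1']⟩⟩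
    · obtain ⟨hp1, hp2, hfv, -⟩ : p1 = ("--stopping-criterion", "stdrel") ∧
          p2 = ("--min-time", "0.5") ∧ fv = ("--max-noise", "0.3") ∧ ds2 = _ := by
        simpa [pvDefaultsB] using hsplit.symm
      subst hp1; subst hp2; subst hfv
      intro g hg
      by_contra hgm
      have hgm' : pvHitRec g.1 args = false := eq_false_of_ne_true hgm
      refine hnd ⟨2, hl, by change (!(args.dropLast.contains "--max-noise" || args.any fun x => PySem.Str.startswith x ("--max-noise" ++ "="))) = true; rw [← pvHitRec_eq]; simp [hm],
        List.any_eq_true.mpr ⟨g.1, ?_, by rw [← pvHitRec_eq]; simp [hgm']⟩⟩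
      rcases List.mem_cons.mp hg with rfl | hg
      · decide
      · rcases List.mem_singleton.mp hg with rfl
        decide
    · obtain ⟨hp1, hp2, hp3, hfv, -⟩ : p1 = ("--stopping-criterion", "stdrel") ∧
          p2 = ("--min-time", "0.5") ∧ p3 = ("--max-noise", "0.3") ∧
          fv = ("--min-samples", "20") ∧ ds2 = _ := by
        simpa [pvDefaultsB] using hsplit.symm
      subst hp1; subst hp2; subst hp3; subst hfv
      intro g hg
      by_contra hgm
      have hgm' : pvHitRec g.1 args = false := eq_false_of_ne_true hgm
      refine hnd ⟨3, hl, by change (!(args.dropLast.contains "--min-samples" || args.any fun x => PySem.Str.startswith x ("--min-samples" ++ "="))) = true; rw [← pvHitRec_eq]; simp [hm],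
        List.any_eq_true.mpr ⟨g.1, ?_, by rw [← pvHitRec_eq]; simp [hgm']⟩⟩
      rcases List.mem_cons.mp hg with rfl | hg
      · decide
      · rcases List.mem_cons.mp hg with rfl | hg
        · decide
        · rcases List.mem_singleton.mp hg with rfl
          decide
    · exfalso
      have := congrArg List.length hsplit
      simp [pvDefaultsB] at this
  have := pvTailFold args _ pvDefaultsB [] hpres (by intro x hx; cases hx) (by decide) hH
  rw [List.append_nil] at this
  exact this

theorem ensure_nvbench_defaults_py_changed : Claim_changed_ensure_nvbench_defaults_py := by
  unfold Claim_changed_ensure_nvbench_defaults_py; decide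

theorem ensure_nvbench_defaults_py_tight : Claim_exact_ensure_nvbench_defaults_py := by
  intro args _ hD
  obtain ⟨i, hl, hmiss, hany⟩ := hD
  have hA : ensure_nvbench_defaults_py args
      = args ++ pvDefaultsB.foldl (fun tl fv =>
          if !pvHitRec fv.1 args && !(decide (tl ≠ []) && (args.getLast? == some fv.1))
          then tl ++ [fv.1, fv.2] else tl) [] := by
    unfold ensure_nvbench_defaults_py
    rw [show PySem.Dict.items pvDefaultsA = pvDefaultsB from rfl]
    have := pvAchar args pvDefaultsB [] (by intro x hx; cases hx) (by decide)
    rw [List.append_nil] at this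
    exact this
  rw [hA, pvBchar args]
  intro heq
  have heq' := List.append_cancel_left heq
  fin_cases i
  · exact absurd hany (by simp)
  · have hm : pvHitRec "--min-time" args = false := by
      rw [pvHitRec_eq]
      have h : (!(args.dropLast.contains "--min-time" ||
          args.any fun x => PySem.Str.startswith x ("--min-time" ++ "="))) = true := hmiss
      simpa using h
    have hl' : args.getLast? = some "--min-time" := hl
    have h1 : pvHitRec "--stopping-criterion" args = false := by
      rw [pvHitRec_eq]
      have h : (["--stopping-criterion"].any fun f => !(args.dropLast.contains f ||
          args.any fun x => PySem.Str.startswith x (f ++ "="))) = true := hany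
      simpa using h
    cases h3 : pvHitRec "--max-noise" args <;> cases h4 : pvHitRec "--min-samples" args <;>
      simp [pvDefaultsB, hl', hm, h1, h3, h4] at heq'
  · have hm : pvHitRec "--max-noise" args = false := by
      rw [pvHitRec_eq]
      have h : (!(args.dropLast.contains "--max-noise" ||
          args.any fun x => PySem.Str.startswith x ("--max-noise" ++ "="))) = true := hmiss
      simpa using h
    have hl' : args.getLast? = some "--max-noise" := hl
    have hor : pvHitRec "--stopping-criterion" args = false ∨
        pvHitRec "--min-time" args = false := by
      have h : (["--stopping-criterion", "--min-time"].any fun f => !(args.dropLast.contains f ||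
          args.any fun x => PySem.Str.startswith x (f ++ "="))) = true := hany
      simp only [List.any_cons, List.any_nil, Bool.or_false, Bool.or_eq_true] at h
      rcases h with h | h
      · exact Or.inl (by rw [pvHitRec_eq]; simpa using h)
      · exact Or.inr (by rw [pvHitRec_eq]; simpa using h)
    cases h1 : pvHitRec "--stopping-criterion" args <;>
      cases h2 : pvHitRec "--min-time" args <;>
      cases h4 : pvHitRec "--min-samples" args <;>
      rcases hor with h | h <;>
      simp_all [pvDefaultsB, hl', hm]
  · have hm : pvHitRec "--min-samples" args = false := by
      rw [pvHitRec_eq]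
      have h : (!(args.dropLast.contains "--min-samples" ||
          args.any fun x => PySem.Str.startswith x ("--min-samples" ++ "="))) = true := hmiss
      simpa using h
    have hl' : args.getLast? = some "--min-samples" := hl
    have hor : pvHitRec "--stopping-criterion" args = false ∨
        pvHitRec "--min-time" args = false ∨ pvHitRec "--max-noise" args = false := by
      have h : (["--stopping-criterion", "--min-time", "--max-noise"].any fun f =>
          !(args.dropLast.contains f ||
            args.any fun x => PySem.Str.startswith x (f ++ "="))) = true := hany
      simp only [List.any_cons, List.any_nil, Bool.or_false, Bool.or_eq_true] at h
      rcases h with h | h | h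
      · exact Or.inl (by rw [pvHitRec_eq]; simpa using h)
      · exact Or.inr (Or.inl (by rw [pvHitRec_eq]; simpa using h))
      · exact Or.inr (Or.inr (by rw [pvHitRec_eq]; simpa using h))
    cases h1 : pvHitRec "--stopping-criterion" args <;>
      cases h2 : pvHitRec "--min-time" args <;>
      cases h3 : pvHitRec "--max-noise" args <;>
      rcases hor with h | h | h <;>
      simp_all [pvDefaultsB, hl', hm]
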